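-- pv_equiv track=rewrite | github.com/stainedhat/crypto | caesar.py | setup_charset
-- ===== SOURCE A (Python) =====
-- def setup_charset(charset=None):
--     """
--     Common functionality between the caesar functions so better to abstract it out
--     :param charset: a string containing the desired charset or None to get default charset. Cannot contain duplicates!
--     :return: A charset and it's given length
--     """
--     if not charset:
--         charset = str("ABCDEFGHIJKLMNOPQRSTUVWXYZabcdefghijklmnopqrstuvwxyz0123456789!@#$%^&*()_+-=[]\{}|;\':\",./<>?`~")
--     else:
--         charset = str(charset)
--
--     duplicates = set()
--     for c in charset:
--         if c in duplicates:
--             raise ValueError("The charset cannot contain duplicates")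
--         else:
--             duplicates.add(c)
--
--     charset_len = len(charset)
--
--     return charset, charset_len
-- ===== SOURCE B (Python) =====
-- def setup_charset(charset=None):
--     if not charset:
--         charset = str("ABCDEFGHIJKLMNOPQRSTUVWXYZabcdefghijklmnopqrstuvwxyz0123456789!@#$%^&*()_+-=[]\{}|;\':\",./<>?`~")
--     else:
--         charset = str(charset)
--
--     s = sorted(charset)
--     for a, b in zip(s, s[1:]):
--         if a == b:
--             raise ValueError("The charset cannot contain duplicates")
--
--     return charset, len(charset)
-- ===== Notes on version B (the rewrite author's own statement) =====
-- stated objective: alternative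
-- what changed: Duplicates are detected by sorting the charset and scanning adjacent pairs for equality, instead of A's single pass that grows a hash set with an early-exit membership test.
import Mathlib
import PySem

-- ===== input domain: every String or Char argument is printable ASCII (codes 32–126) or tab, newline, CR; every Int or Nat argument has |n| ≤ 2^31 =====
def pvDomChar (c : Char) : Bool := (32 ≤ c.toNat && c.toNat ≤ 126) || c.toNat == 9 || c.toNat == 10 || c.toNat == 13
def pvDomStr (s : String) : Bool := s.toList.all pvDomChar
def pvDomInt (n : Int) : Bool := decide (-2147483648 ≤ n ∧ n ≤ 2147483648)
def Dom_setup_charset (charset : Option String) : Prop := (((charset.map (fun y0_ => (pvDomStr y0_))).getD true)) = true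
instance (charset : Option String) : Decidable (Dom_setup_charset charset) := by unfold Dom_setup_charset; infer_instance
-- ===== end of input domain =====

-- B detects duplicates by sorting the charset and scanning adjacent pairs, instead of A's hash-set pass (alternative; same return value).

-- ===== PORT A =====
-- the default charset literal from the Python source (the Python '\{' and '\'' are a literal backslash-'{' and a quote)
def pvCaesarDefault : String :=
  "ABCDEFGHIJKLMNOPQRSTUVWXYZabcdefghijklmnopqrstuvwxyz0123456789!@#$%^&*()_+-=[]\\{}|;':\",./<>?`~"

-- 'if not charset: charset = <default> else: charset = str(charset)' (str() is the identity on str)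
def pvEffCharset (charset : Option String) : String :=
  match charset with
  | none => pvCaesarDefault
  | some s => if s = "" then pvCaesarDefault else s

-- A's loop: 'duplicates = set(); for c in charset: if c in duplicates: raise … else: duplicates.add(c)'
-- returns false exactly where the Python raises ValueError (those inputs are outside Pre_)
def pvALoop : List Char → PySem.Set Char → Bool
  | [], _ => true
  | c :: rest, dups =>
      if PySem.Set.contains dups c then false
      else pvALoop rest (PySem.Set.add dups c)

def setup_charset (charset : Option String) : String × Int :=
  let cs := pvEffCharset charset
  if pvALoop cs.toList PySem.Set.empty then (cs, (cs.toList.length : Int))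
  else ("", 0)  -- ValueError: outside Pre_

-- ===== PORT B =====
-- 'for a, b in zip(s, s[1:]): if a == b: raise …' — scan adjacent pairs of the sorted list
def pvAdjDup : List Char → Bool
  | a :: b :: rest => if a = b then true else pvAdjDup (b :: rest)
  | _ => false

def setup_charset_alt (charset : Option String) : String × Int :=
  let cs := pvEffCharset charset
  let s := PySem.List.sorted cs.toList (fun c => c.toNat) false
  if pvAdjDup s then ("", 0)  -- ValueError: outside Pre_
  else (cs, (cs.toList.length : Int))

-- ===== PRECONDITION & SPEC =====
-- Pre_ excludes exactly the inputs whose effective charset contains a duplicate character: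
-- there the Python A raises ValueError (and B raises the same ValueError).
def Pre_setup_charset (charset : Option String) : Prop := (pvEffCharset charset).toList.Nodup
instance (charset : Option String) : Decidable (Pre_setup_charset charset) := by
  unfold Pre_setup_charset; infer_instance

def pvWitness_setup_charset : Option String := some "abc"

def Spec_setup_charset (charset : Option String) (out : String × Int) : Prop := out = setup_charset_alt charset
instance (charset : Option String) (out : String × Int) : Decidable (Spec_setup_charset charset out) := by unfold Spec_setup_charset; infer_instance

-- ===== CLAIM =====
def Claim_equal_setup_charset : Prop := ∀ (charset : Option String), Dom_setup_charset charset → Pre_setup_charset charset → Spec_setup_charset charset (setup_charset charset)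

-- ===== LEMMAS AND PROOFS =====

-- A's loop succeeds on a duplicate-free list disjoint from the accumulated set
theorem pvALoop_of_nodup (l : List Char) (acc : PySem.Set Char)
    (hnd : l.Nodup) (hdisj : ∀ c ∈ l, c ∉ acc) : pvALoop l acc = true := by
  induction l generalizing acc with
  | nil => rfl
  | cons c rest ih =>
    have hc : c ∉ acc := hdisj c (List.mem_cons_self ..)
    have hnc : PySem.Set.contains acc c = false := by
      simpa [PySem.Set.contains_iff] using hc
    simp only [pvALoop, hnc, Bool.false_eq_true, if_false]
    refine ih _ hnd.of_cons (fun x hx => ?_)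
    have hxa : x ∉ acc := hdisj x (List.mem_cons_of_mem _ hx)
    have hxc : x ≠ c := fun h => (List.nodup_cons.mp hnd).1 (h ▸ hx)
    simp [hc, hxa, hxc]

-- the adjacent-pair scan finds nothing on a duplicate-free list
theorem pvAdjDup_of_nodup (l : List Char) (hnd : l.Nodup) : pvAdjDup l = false := by
  induction l with
  | nil => rfl
  | cons a rest ih =>
    cases rest with
    | nil => rfl
    | cons b t =>
      have hab : a ≠ b := fun h => (List.nodup_cons.mp hnd).1 (h ▸ List.mem_cons_self ..)
      simp only [pvAdjDup, if_neg hab]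
      exact ih hnd.of_cons

-- ===== VERDICT =====
theorem setup_charset_spec : Claim_equal_setup_charset := by
  intro charset _ hpre
  unfold Spec_setup_charset setup_charset setup_charset_alt
  have hA : pvALoop (pvEffCharset charset).toList PySem.Set.empty = true :=
    pvALoop_of_nodup _ _ hpre (by intro c _; simp [PySem.Set.empty])
  have hsnd : (PySem.List.sorted (pvEffCharset charset).toList (fun c => c.toNat) false).Nodup :=
    (PySem.List.sorted_perm ..).nodup_iff.mpr hpre
  have hB := pvAdjDup_of_nodup _ hsnd
  simp only [PySem.Set.empty] at hA
  simp [hA, hB]
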